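-- pv_equiv track=rewrite | github.com/haokaibo/PythonPractice | src/AlgoExpert/best_seat.py | optimized_bestSeat
-- ===== SOURCE A (Python) =====
-- def optimized_bestSeat(seats):
--     best = -1
--     zero = start = length = 0
--     for i, num in enumerate(seats):
--         if num == 0:
--             zero += 1
--         else:
--             if zero > length:
--                 best, length = (i + start) // 2, zero
--             zero, start = 0, i
--     return best
-- ===== SOURCE B (Python) =====
-- def optimized_bestSeat(seats):
--     occ = [i for i, n in enumerate(seats) if n]
--     if not occ:
--         return -1
--     best, length = -1, 0
--     if occ[0] > 0:
--         best, length = occ[0] // 2, occ[0]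
--     for prev, cur in zip(occ, occ[1:]):
--         size = cur - prev - 1
--         if size > length:
--             best, length = (prev + cur) // 2, size
--     return best
-- ===== Notes on version B (the rewrite author's own statement) =====
-- stated objective: alternative
-- what changed: Replaces A's single stateful scan (counters best/zero/start/length threaded through one loop) with a two-phase decomposition: collect the occupied indices once, score the leading gap, then scan consecutive occupied-index pairs.
import Mathlib
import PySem

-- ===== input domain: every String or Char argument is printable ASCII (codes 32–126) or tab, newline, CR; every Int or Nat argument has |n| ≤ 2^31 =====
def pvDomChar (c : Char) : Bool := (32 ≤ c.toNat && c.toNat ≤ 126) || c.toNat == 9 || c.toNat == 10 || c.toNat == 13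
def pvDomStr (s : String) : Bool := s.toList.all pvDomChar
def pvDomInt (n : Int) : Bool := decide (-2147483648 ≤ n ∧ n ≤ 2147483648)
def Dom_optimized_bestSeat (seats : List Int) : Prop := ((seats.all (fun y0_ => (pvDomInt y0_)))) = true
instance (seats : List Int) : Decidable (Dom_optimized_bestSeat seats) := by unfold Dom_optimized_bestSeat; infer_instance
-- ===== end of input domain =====

-- B replaces A's single stateful scan (counters zero/start threaded through one loop) by:
-- collect the occupied indices once, handle the leading gap, then scan consecutive pairs
-- (alternative decomposition, same O(n) cost).

-- ===== PORT A =====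
-- one pass over enumerate(seats) with state (best, zero, start, length), as in A
def optimized_bestSeat (seats : List Int) : Int :=
  (((PySem.List.enumerate seats).foldl
    (fun (st : Int × Int × Int × Int) (p : Int × Int) =>
      let best := st.1; let zero := st.2.1; let start := st.2.2.1; let length := st.2.2.2
      if p.2 == 0 then (best, zero + 1, start, length)
      else if zero > length then (PySem.Int.floordiv (p.1 + start) 2, 0, p.1, zero)
      else (best, 0, p.1, length))
    (-1, 0, 0, 0))).1

-- ===== PORT B =====
-- occ = [i for i, n in enumerate(seats) if n]; leading gap; then zip(occ, occ[1:])
def optimized_bestSeat_alt (seats : List Int) : Int :=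
  let occ := ((PySem.List.enumerate seats).filter (fun p => !(p.2 == 0))).map (fun p => p.1)
  match occ with
  | [] => -1
  | o0 :: rest =>
    let init : Int × Int := if o0 > 0 then (PySem.Int.floordiv o0 2, o0) else (-1, 0)
    ((occ.zip rest).foldl
      (fun (st : Int × Int) (pc : Int × Int) =>
        let size := pc.2 - pc.1 - 1
        if size > st.2 then (PySem.Int.floordiv (pc.1 + pc.2) 2, size) else st)
      init).1

-- ===== PRECONDITION & SPEC =====
def Spec_optimized_bestSeat (seats : List Int) (out : Int) : Prop := out = optimized_bestSeat_alt seats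
instance (seats : List Int) (out : Int) : Decidable (Spec_optimized_bestSeat seats out) := by unfold Spec_optimized_bestSeat; infer_instance

-- ===== CLAIM (what is proved, stated in full; the proofs are below) =====
def Claim_equal_optimized_bestSeat : Prop := ∀ (seats : List Int), Dom_optimized_bestSeat seats → Spec_optimized_bestSeat seats (optimized_bestSeat seats)

-- ===== LEMMAS AND PROOFS =====

-- A's loop as a structural recursion on the list, index carried explicitly
def runA : List Int → Int → Int × Int × Int × Int → Int × Int × Int × Int
  | [], _, st => st
  | num :: rest, i, (best, zero, start, length) =>
      if num == 0 then runA rest (i + 1) (best, zero + 1, start, length)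
      else if zero > length then runA rest (i + 1) (PySem.Int.floordiv (i + start) 2, 0, i, zero)
      else runA rest (i + 1) (best, 0, i, length)

-- B's pair loop as a structural recursion: previous occupied index carried explicitly
def runB : Int → List Int → Int × Int → Int × Int
  | _, [], st => st
  | prev, cur :: rest, (best, length) =>
      runB cur rest
        (if cur - prev - 1 > length then (PySem.Int.floordiv (prev + cur) 2, cur - prev - 1) else (best, length))

-- absolute indices (starting at i) of the nonzero entries of l
def occIdx : List Int → Int → List Int
  | [], _ => []
  | num :: rest, i => if num == 0 then occIdx rest (i + 1) else i :: occIdx rest (i + 1)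

-- what A's loop produces, expressed over the occupied indices of the remaining list
def post (occ : List Int) (i best zero start length : Int) : Int :=
  match occ with
  | [] => best
  | j :: rest =>
      (runB j rest
        (if zero + (j - i) > length then (PySem.Int.floordiv (j + start) 2, zero + (j - i))
         else (best, length))).1

lemma foldA_eq_runA (l : List Int) (i : Int) (st : Int × Int × Int × Int) :
    (PySem.List.enumerate l i).foldl
      (fun (st : Int × Int × Int × Int) (p : Int × Int) =>
        let best := st.1; let zero := st.2.1; let start := st.2.2.1; let length := st.2.2.2
        if p.2 == 0 then (best, zero + 1, start, length)
        else if zero > length then (PySem.Int.floordiv (p.1 + start) 2, 0, p.1, zero)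
        else (best, 0, p.1, length)) st
      = runA l i st := by
  induction l generalizing i st with
  | nil => simp [PySem.List.enumerate_nil, runA]
  | cons num rest ih =>
    obtain ⟨best, zero, start, length⟩ := st
    simp only [PySem.List.enumerate_cons, List.foldl_cons, runA]
    split_ifs <;> simp_all

lemma foldB_eq_runB (rest : List Int) (prev : Int) (st : Int × Int) :
    (((prev :: rest).zip rest).foldl
      (fun (st : Int × Int) (pc : Int × Int) =>
        let size := pc.2 - pc.1 - 1
        if size > st.2 then (PySem.Int.floordiv (pc.1 + pc.2) 2, size) else st) st)
      = runB prev rest st := by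
  induction rest generalizing prev st with
  | nil => simp [runB]
  | cons cur r ih =>
    obtain ⟨best, length⟩ := st
    simp only [List.zip_cons_cons, List.foldl_cons, runB]
    exact ih cur _

lemma occ_eq_occIdx (l : List Int) (i : Int) :
    ((PySem.List.enumerate l i).filter (fun p => !(p.2 == 0))).map (fun p => p.1)
      = occIdx l i := by
  induction l generalizing i with
  | nil => simp [PySem.List.enumerate_nil, occIdx]
  | cons num rest ih =>
    simp only [PySem.List.enumerate_cons, List.filter_cons, occIdx]
    by_cases h : num = 0 <;> simp [h, ih]

lemma post_shift (occ : List Int) (i best zero start length : Int) :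
    post occ (i + 1) best (zero + 1) start length = post occ i best zero start length := by
  cases occ with
  | nil => rfl
  | cons j r =>
    have e : zero + 1 + (j - (i + 1)) = zero + (j - i) := by ring
    simp [post, e]

lemma runB_eq_post (occ : List Int) (i best length : Int) :
    (runB i occ (best, length)).1 = post occ (i + 1) best 0 i length := by
  cases occ with
  | nil => simp [runB, post]
  | cons j r =>
    have e : (0 : Int) + (j - (i + 1)) = j - i - 1 := by ring
    have e2 : j + i = i + j := by ring
    simp [runB, post, e, e2]

lemma runA_eq_post (l : List Int) (i best zero start length : Int) :
    (runA l i (best, zero, start, length)).1 = post (occIdx l i) i best zero start length := by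
  induction l generalizing i best zero start length with
  | nil => simp [runA, occIdx, post]
  | cons num rest ih =>
    by_cases h : num = 0
    · simp only [runA, occIdx, h, beq_self_eq_true, if_true]
      rw [ih, post_shift]
    · have hb : (num == 0) = false := by simp [h]
      simp only [runA, occIdx, hb, Bool.false_eq_true, if_false]
      split_ifs with hz
      · rw [ih, ← runB_eq_post]
        simp [post, hz]
      · rw [ih, ← runB_eq_post]
        simp [post, hz]

-- ===== VERDICT (by name: the statement is the Claim_ definition above) =====
theorem optimized_bestSeat_spec : Claim_equal_optimized_bestSeat := by
  intro seats _
  show optimized_bestSeat seats = optimized_bestSeat_alt seats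
  unfold optimized_bestSeat optimized_bestSeat_alt
  rw [foldA_eq_runA, runA_eq_post, occ_eq_occIdx]
  cases hocc : occIdx seats 0 with
  | nil => simp [post]
  | cons j r =>
    simp only [post]
    rw [foldB_eq_runB]
    have e2 : j + 0 = j := by ring
    simp [e2]
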